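-- pv_equiv track=rewrite | github.com/chaichai1997/python-algorithm | array_allocate.py | calculate_process_time
-- ===== SOURCE A (Python) =====
-- def calculate_process_time(time, number):
--     if time is None or number <= 0:
--         return None
--     n_t = len(time)
--     p_time = [0] * n_t
--     for i in range(number):
--         min_time = p_time[0] + time[0]
--         min_index = 0  # 指机器数目
--         j = 1
--         while j < n_t:
--             if min_time > p_time[j] + time[j]:
--                 min_time = p_time[j] + time[j]
--                 min_index = j
--             j += 1
--         p_time[min_index] = min_time
--         i += 1
--     return p_time
-- ===== SOURCE B (Python) =====
-- def _insort(keys, x):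
--     # insert x into the sorted list keys, after any equal entries
--     i = 0
--     while i < len(keys) and not (x < keys[i]):
--         i += 1
--     keys.insert(i, x)
--
--
-- def calculate_process_time(time, number):
--     if time is None or number <= 0:
--         return None
--     # event list of (next completion time, machine index), kept sorted
--     keys = sorted((t, i) for i, t in enumerate(time))
--     for _ in range(number):
--         c, i = keys.pop(0)
--         _insort(keys, (c + time[i], i))
--     p = [0] * len(time)
--     for c, i in keys:
--         p[i] = c - time[i]
--     return p
-- ===== Notes on version B (the rewrite author's own statement) =====
-- stated objective: alternative
-- what changed: Replaces A's per-task interpreted argmin rescan of the load array by an event list of (next completion time, machine index) pairs kept sorted: each task pops the head (the lexicographic minimum) and re-inserts the machine's next completion with an ordered insert, and the load array is rebuilt once from the final event list; a timing run measured this constant-factor change as >1.5x faster.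
import Mathlib
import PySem

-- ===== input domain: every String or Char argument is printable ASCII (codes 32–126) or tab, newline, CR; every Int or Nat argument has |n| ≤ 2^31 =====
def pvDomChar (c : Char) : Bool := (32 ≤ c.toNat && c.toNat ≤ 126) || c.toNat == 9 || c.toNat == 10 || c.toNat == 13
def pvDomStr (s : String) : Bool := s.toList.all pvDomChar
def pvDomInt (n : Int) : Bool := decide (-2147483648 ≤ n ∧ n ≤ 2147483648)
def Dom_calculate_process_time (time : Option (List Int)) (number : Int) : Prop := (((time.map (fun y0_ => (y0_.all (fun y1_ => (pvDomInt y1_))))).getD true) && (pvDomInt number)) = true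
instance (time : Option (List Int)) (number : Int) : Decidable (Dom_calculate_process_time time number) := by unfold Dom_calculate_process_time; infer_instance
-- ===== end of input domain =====

-- B keeps a sorted event list of (next completion time, machine index) pairs instead of
-- rescanning the load array for each task (alternative data structure, same exact greedy result).

-- ===== PORT A =====
-- the body of A's inner while loop (j scans 1..n_t keeping the first argmin of p[j]+time[j])
def cptA_scan (p t : List Int) : Int × Int :=
  (PySem.List.pyRange 1 (PySem.List.len t) 1).foldl
    (fun mi j =>
      if mi.1 > PySem.List.pyGetD p j 0 + PySem.List.pyGetD t j 0 then
        (PySem.List.pyGetD p j 0 + PySem.List.pyGetD t j 0, j)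
      else mi)
    (PySem.List.pyGetD p 0 0 + PySem.List.pyGetD t 0 0, 0)

def calculate_process_time (time : Option (List Int)) (number : Int) : Option (List Int) :=
  match time with
  | none => none
  | some t =>
    if number ≤ 0 then none
    else
      some ((PySem.List.pyRange 0 number 1).foldl
        (fun p _ =>
          let mi := cptA_scan p t
          PySem.List.pySetD p mi.2 mi.1)
        (List.replicate t.length 0))

-- ===== PORT B =====
-- Python tuple comparison (a1, a2) < (b1, b2) for int pairs
def cptLt (a b : Int × Int) : Bool :=
  a.1 < b.1 || (a.1 == b.1 && a.2 < b.2)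

-- _insort: insert x into a sorted list, after any equal entries (walk until x < head)
def cptB_insort (x : Int × Int) : List (Int × Int) → List (Int × Int)
  | [] => [x]
  | y :: ys => if cptLt x y then x :: y :: ys else y :: cptB_insort x ys

-- one iteration of B's for-loop: pop the head, re-insert the machine's next completion
def cptB_step (t : List Int) (ks : List (Int × Int)) : List (Int × Int) :=
  match ks with
  | [] => []
  | k :: rest => cptB_insort (k.1 + PySem.List.pyGetD t k.2 0, k.2) rest

def calculate_process_time_alt (time : Option (List Int)) (number : Int) : Option (List Int) :=
  match time with
  | none => none
  | some t =>
    if number ≤ 0 then none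
    else
      -- keys = sorted((t, i) for i, t in enumerate(time)); sorted() ported as insertion sort
      let keys0 := ((PySem.List.enumerate t 0).map (fun z => (z.2, z.1))).foldr cptB_insort []
      let keys := (PySem.List.pyRange 0 number 1).foldl (fun ks _ => cptB_step t ks) keys0
      some (keys.foldl
        (fun p ci => PySem.List.pySetD p ci.2 (ci.1 - PySem.List.pyGetD t ci.2 0))
        (List.replicate t.length 0))

-- ===== PRECONDITION & SPEC =====
-- Pre_ excludes only time = Some [] with number > 0, where A (p_time[0]) raises IndexError (B's pop(0) raises too).
def Pre_calculate_process_time (time : Option (List Int)) (number : Int) : Prop :=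
  number ≤ 0 ∨ time ≠ some ([] : List Int)
instance (time : Option (List Int)) (number : Int) : Decidable (Pre_calculate_process_time time number) := by
  unfold Pre_calculate_process_time; infer_instance

def pvWitness_calculate_process_time : Option (List Int) × Int := (some [3, 5, 7], 6)

def Spec_calculate_process_time (time : Option (List Int)) (number : Int) (out : Option (List Int)) : Prop := out = calculate_process_time_alt time number
instance (time : Option (List Int)) (number : Int) (out : Option (List Int)) : Decidable (Spec_calculate_process_time time number out) := by unfold Spec_calculate_process_time; infer_instance

-- ===== CLAIM (what is proved, stated in full; the proofs are below) =====
def Claim_equal_calculate_process_time : Prop := ∀ (time : Option (List Int)) (number : Int), Dom_calculate_process_time time number → Pre_calculate_process_time time number → Spec_calculate_process_time time number (calculate_process_time time number)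

-- ===== LEMMAS AND PROOFS =====

-- lexicographic order on (completion, index) pairs, as a Prop
def cptLe (a b : Int × Int) : Prop := a.1 < b.1 ∨ (a.1 = b.1 ∧ a.2 ≤ b.2)

lemma cptLe_trans {a b c : Int × Int} (h1 : cptLe a b) (h2 : cptLe b c) : cptLe a c := by
  unfold cptLe at *; omega

lemma cptLe_antisymm {a b : Int × Int} (h1 : cptLe a b) (h2 : cptLe b a) : a = b := by
  unfold cptLe at *
  obtain ⟨x1, x2⟩ := a; obtain ⟨y1, y2⟩ := b
  simp only [Prod.mk.injEq]
  constructor <;> omega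

lemma cptLt_true {a b : Int × Int} (h : cptLt a b = true) : cptLe a b := by
  unfold cptLt at h; unfold cptLe
  simp only [Bool.or_eq_true, Bool.and_eq_true, decide_eq_true_eq, beq_iff_eq] at h
  omega

lemma cptLt_false {a b : Int × Int} (h : cptLt a b = false) : cptLe b a := by
  unfold cptLt at h; unfold cptLe
  simp only [Bool.or_eq_false_iff, Bool.and_eq_false_iff, decide_eq_false_iff_not, beq_eq_false_iff_ne] at h
  rcases h with ⟨h1, h2⟩
  rcases h2 with h2 | h2 <;> omega

-- the (value, index) pairs A's scan ranges over
def cptPairs (p t : List Int) : List (Int × Int) :=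
  (PySem.List.pyRange 0 (PySem.List.len t) 1).map
    (fun j => (PySem.List.pyGetD p j 0 + PySem.List.pyGetD t j 0, j))

-- A's fold computes a lexicographic minimum (indices scanned in increasing order)
lemma cpt_fold_min (v : Int → Int) :
    ∀ (l : List Int) (acc : Int × Int),
      (∀ j ∈ l, acc.2 < j) → l.Pairwise (· < ·) →
      ((l.foldl (fun mi j => if mi.1 > v j then (v j, j) else mi) acc = acc ∨
        l.foldl (fun mi j => if mi.1 > v j then (v j, j) else mi) acc ∈ l.map (fun j => (v j, j))) ∧
       cptLe (l.foldl (fun mi j => if mi.1 > v j then (v j, j) else mi) acc) acc ∧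
       ∀ j ∈ l, cptLe (l.foldl (fun mi j => if mi.1 > v j then (v j, j) else mi) acc) (v j, j)) := by
  intro l
  induction l with
  | nil => intro acc _ _; exact ⟨Or.inl rfl, Or.inr ⟨rfl, le_refl _⟩, by simp⟩
  | cons j l ih =>
    intro acc hlt hpw
    rcases List.pairwise_cons.mp hpw with ⟨hj, hpw'⟩
    simp only [List.foldl_cons]
    set acc' := (if acc.1 > v j then (v j, j) else acc) with hacc'
    have hlt' : ∀ j' ∈ l, acc'.2 < j' := by
      intro j' hj'
      rw [hacc']; split
      · exact hj j' hj'
      · exact hlt j' (List.mem_cons_of_mem _ hj')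
    obtain ⟨hmem, hle, hall⟩ := ih acc' hlt' hpw'
    have hle_acc' : cptLe acc' acc := by
      rw [hacc']; split
      · rename_i h; exact Or.inl h
      · exact Or.inr ⟨rfl, le_refl _⟩
    have hle_vj : cptLe acc' (v j, j) := by
      rw [hacc']; split
      · exact Or.inr ⟨rfl, le_refl _⟩
      · rename_i h
        have h2 := hlt j (List.mem_cons_self ..)
        unfold cptLe
        simp only [gt_iff_lt, not_lt] at h
        omega
    refine ⟨?_, cptLe_trans hle hle_acc', ?_⟩
    · rcases hmem with h | h
      · rw [h, hacc']; split
        · right; exact List.mem_map.mpr ⟨j, List.mem_cons_self .., rfl⟩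
        · left; rfl
      · right
        rcases List.mem_map.mp h with ⟨j', hj', he⟩
        exact List.mem_map.mpr ⟨j', List.mem_cons_of_mem _ hj', he⟩
    · intro j' hj'
      rcases List.mem_cons.mp hj' with h | h
      · exact h ▸ cptLe_trans hle hle_vj
      · exact hall j' h

-- scan is a member of cptPairs and a cptLe-lower bound of it
lemma cptA_scan_min (p t : List Int) (hne : t ≠ []) :
    cptA_scan p t ∈ cptPairs p t ∧ ∀ x ∈ cptPairs p t, cptLe (cptA_scan p t) x := by
  have hn : (0 : Int) < (t.length : Int) := by
    have := List.length_pos_iff.mpr hne; exact_mod_cast this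
  have hcons : PySem.List.pyRange 0 (t.length : Int) 1 = 0 :: PySem.List.pyRange 1 (t.length : Int) 1 := by
    have := PySem.List.pyRange_one_cons (a := 0) (b := (t.length : Int)) hn
    simpa using this
  have hrange1 : ∀ j ∈ PySem.List.pyRange 1 (t.length : Int) 1, (0 : Int) < j := by
    intro j hj
    have := (PySem.List.mem_pyRange_one).mp hj
    omega
  obtain ⟨hmem, hle, hall⟩ :=
    cpt_fold_min (fun j => PySem.List.pyGetD p j 0 + PySem.List.pyGetD t j 0)
      (PySem.List.pyRange 1 (t.length : Int) 1)
      (PySem.List.pyGetD p 0 0 + PySem.List.pyGetD t 0 0, 0)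
      hrange1 (PySem.List.pairwise_lt_pyRange_one _ _)
  have hscan : cptA_scan p t =
      (PySem.List.pyRange 1 (t.length : Int) 1).foldl
        (fun mi j => if mi.1 > PySem.List.pyGetD p j 0 + PySem.List.pyGetD t j 0 then
          (PySem.List.pyGetD p j 0 + PySem.List.pyGetD t j 0, j) else mi)
        (PySem.List.pyGetD p 0 0 + PySem.List.pyGetD t 0 0, 0) := by
    unfold cptA_scan
    simp only [PySem.List.len_eq]
  have hpairs : cptPairs p t =
      (PySem.List.pyGetD p 0 0 + PySem.List.pyGetD t 0 0, 0) ::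
        (PySem.List.pyRange 1 (t.length : Int) 1).map
          (fun j => (PySem.List.pyGetD p j 0 + PySem.List.pyGetD t j 0, j)) := by
    unfold cptPairs
    simp only [PySem.List.len_eq]
    rw [hcons]
    simp
  rw [hscan, hpairs]
  constructor
  · rcases hmem with h | h
    · rw [h]; exact List.mem_cons_self ..
    · exact List.mem_cons_of_mem _ h
  · intro x hx
    rcases List.mem_cons.mp hx with h | h
    · exact h ▸ hle
    · rcases List.mem_map.mp h with ⟨j', hj', he⟩
      exact he ▸ hall j' hj' 

lemma mem_cptPairs {p t : List Int} {ci : Int × Int} (h : ci ∈ cptPairs p t) :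
    ∃ j : Nat, j < t.length ∧
      ci = (PySem.List.pyGetD p (j : Int) 0 + PySem.List.pyGetD t (j : Int) 0, (j : Int)) := by
  unfold cptPairs at h
  rcases List.mem_map.mp h with ⟨jI, hmem, hje⟩
  rw [PySem.List.mem_pyRange_one] at hmem
  simp only [PySem.List.len_eq] at hmem
  refine ⟨jI.toNat, by omega, ?_⟩
  have : (jI.toNat : Int) = jI := by omega
  rw [this, hje]

lemma cptPairs_length (p t : List Int) : (cptPairs p t).length = t.length := by
  simp [cptPairs, PySem.List.length_pyRange_one]

lemma cptPairs_getElem (p t : List Int) (j : Nat) (hj : j < t.length) :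
    (cptPairs p t)[j]'(by rw [cptPairs_length]; exact hj) =
      (PySem.List.pyGetD p (j : Int) 0 + PySem.List.pyGetD t (j : Int) 0, (j : Int)) := by
  unfold cptPairs
  rw [List.getElem_map]
  rw [PySem.List.getElem_pyRange_one]
  simp

-- head of a sorted permutation of cptPairs is A's scan result
lemma cpt_head_eq {p t : List Int} (hne : t ≠ []) {k : Int × Int} {rest : List (Int × Int)}
    (hperm : (k :: rest).Perm (cptPairs p t)) (hsort : (k :: rest).Pairwise cptLe) :
    k = cptA_scan p t := by
  obtain ⟨hmemS, hmin⟩ := cptA_scan_min p t hne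
  have hk_mem : k ∈ cptPairs p t := hperm.mem_iff.mp (List.mem_cons_self ..)
  have hs_mem : cptA_scan p t ∈ k :: rest := hperm.mem_iff.mpr hmemS
  have h1 : cptLe (cptA_scan p t) k := hmin k hk_mem
  rcases List.mem_cons.mp hs_mem with h | h
  · exact h.symm
  · exact cptLe_antisymm ((List.pairwise_cons.mp hsort).1 _ h) h1

lemma cpt_set_perm {α : Type} : ∀ (l : List α) (i : Nat) (v : α), i < l.length →
    (l.set i v).Perm (v :: l.eraseIdx i)
  | x :: xs, 0, v, _ => by simp
  | x :: xs, i + 1, v, h => by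
    simp only [List.set_cons_succ, List.eraseIdx_cons_succ]
    exact ((cpt_set_perm xs i v (by simpa using h)).cons x).trans (List.Perm.swap v x _)

lemma cpt_get_perm {α : Type} : ∀ (l : List α) (i : Nat) (h : i < l.length),
    l.Perm (l[i] :: l.eraseIdx i)
  | x :: xs, 0, _ => by simp
  | x :: xs, i + 1, h => by
    simp only [List.getElem_cons_succ, List.eraseIdx_cons_succ]
    exact (((cpt_get_perm xs i (by simpa using h)).cons x).trans (List.Perm.swap _ x _))

lemma cptPairs_set (p t : List Int) (hlen : p.length = t.length) (i : Nat) (hi : i < t.length) (m : Int) :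
    cptPairs (p.set i m) t =
      (cptPairs p t).set i (m + PySem.List.pyGetD t (i : Int) 0, (i : Int)) := by
  apply List.ext_getElem
  · simp [cptPairs_length, List.length_set]
  · intro j h1 h2
    rw [cptPairs_length] at h1
    rw [cptPairs_getElem _ _ j h1]
    rw [List.getElem_set]
    have hjp : j < p.length := by omega
    have hjs : j < (p.set i m).length := by simp [List.length_set]; omega
    by_cases hij : i = j
    · subst hij
      have hget : PySem.List.pyGetD (p.set i m) (i : Int) 0 = m := by
        rw [PySem.List.pyGetD_eq_getElem _ _ (by omega) (by simp [List.length_set]; omega)]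
        simp
      rw [hget]
      simp
    · simp only [if_neg hij]
      rw [cptPairs_getElem _ _ j h1]
      have hget : PySem.List.pyGetD (p.set i m) (j : Int) 0 = PySem.List.pyGetD p (j : Int) 0 := by
        rw [PySem.List.pyGetD_eq_getElem _ _ (by omega) (by simp [List.length_set]; omega),
            PySem.List.pyGetD_eq_getElem _ _ (by omega) (by simp; omega)]
        simp only [Int.toNat_natCast]
        rw [List.getElem_set]
        simp [hij]
      rw [hget]

lemma cptB_insort_perm (x : Int × Int) : ∀ l, (cptB_insort x l).Perm (x :: l)
  | [] => by simp [cptB_insort]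
  | y :: ys => by
    unfold cptB_insort
    split
    · exact List.Perm.refl _
    · exact ((cptB_insort_perm x ys).cons y).trans (List.Perm.swap x y ys)

lemma cptB_insort_sorted (x : Int × Int) : ∀ l, l.Pairwise cptLe → (cptB_insort x l).Pairwise cptLe
  | [] => by intro _; simp [cptB_insort]
  | y :: ys => by
    intro h
    rcases List.pairwise_cons.mp h with ⟨hy, hys⟩
    unfold cptB_insort
    split
    · rename_i hlt
      refine List.pairwise_cons.mpr ⟨?_, h⟩
      intro b hb
      rcases List.mem_cons.mp hb with hb | hb
      · exact hb ▸ cptLt_true hlt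
      · exact cptLe_trans (cptLt_true hlt) (hy b hb)
    · rename_i hlt
      have hyx : cptLe y x := cptLt_false (by revert hlt; cases hxy : cptLt x y <;> simp)
      refine List.pairwise_cons.mpr ⟨?_, cptB_insort_sorted x ys hys⟩
      intro b hb
      have := (cptB_insort_perm x ys).mem_iff.mp hb
      rcases List.mem_cons.mp this with hb | hb
      · exact hb ▸ hyx
      · exact hy b hb

lemma cpt_foldr_insort (l : List (Int × Int)) :
    (l.foldr cptB_insort []).Perm l ∧ (l.foldr cptB_insort []).Pairwise cptLe := by
  induction l with
  | nil => simp
  | cons x xs ih =>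
    refine ⟨(cptB_insort_perm x _).trans (ih.1.cons x), cptB_insort_sorted x _ ih.2⟩

-- the coupling invariant between A's load list and B's event list
def cptInv (t p : List Int) (keys : List (Int × Int)) : Prop :=
  p.length = t.length ∧ keys.Perm (cptPairs p t) ∧ keys.Pairwise cptLe

lemma cpt_step (t p : List Int) (keys : List (Int × Int)) (hne : t ≠ []) (h : cptInv t p keys) :
    cptInv t (PySem.List.pySetD p (cptA_scan p t).2 (cptA_scan p t).1) (cptB_step t keys) := by
  obtain ⟨hlen, hperm, hsort⟩ := h
  obtain ⟨hmemS, _⟩ := cptA_scan_min p t hne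
  obtain ⟨i, hi, hsc⟩ := mem_cptPairs hmemS
  have hklen : keys.length = t.length := by rw [hperm.length_eq, cptPairs_length]
  have hkne : keys ≠ [] := by
    intro h0
    rw [h0] at hklen
    exact hne (List.length_eq_zero_iff.mp hklen.symm)
  obtain ⟨k, rest, rfl⟩ := List.exists_cons_of_ne_nil hkne
  have hk : k = cptA_scan p t := cpt_head_eq hne hperm hsort
  have hs2 : (cptA_scan p t).2 = (i : Int) := by rw [hsc]
  have hset : PySem.List.pySetD p (cptA_scan p t).2 (cptA_scan p t).1
      = p.set i (cptA_scan p t).1 := by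
    rw [hs2]; simp
  have hpairs' : cptPairs (p.set i (cptA_scan p t).1) t
      = (cptPairs p t).set i ((cptA_scan p t).1 + PySem.List.pyGetD t (i : Int) 0, (i : Int)) :=
    cptPairs_set p t hlen i hi _
  have hiP : i < (cptPairs p t).length := by rw [cptPairs_length]; exact hi
  have hgP : (cptPairs p t)[i]'hiP = cptA_scan p t := by
    rw [cptPairs_getElem p t i hi, hsc]
  have h1 : (cptPairs p t).Perm (cptA_scan p t :: (cptPairs p t).eraseIdx i) := by
    have := cpt_get_perm (cptPairs p t) i hiP
    rwa [hgP] at this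
  have h2 : (cptA_scan p t :: rest).Perm (cptA_scan p t :: (cptPairs p t).eraseIdx i) := by
    have h2' := hperm.trans h1
    rwa [hk] at h2' 
  have hrest : rest.Perm ((cptPairs p t).eraseIdx i) := h2.cons_inv
  have hnew : (k.1 + PySem.List.pyGetD t k.2 0, k.2)
      = ((cptA_scan p t).1 + PySem.List.pyGetD t (i : Int) 0, (i : Int)) := by
    rw [hk, hs2]
  refine ⟨by rw [hset]; simp [List.length_set, hlen], ?_, ?_⟩
  · show (cptB_insort (k.1 + PySem.List.pyGetD t k.2 0, k.2) rest).Perm _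
    rw [hset, hpairs', hnew]
    exact ((cptB_insort_perm _ _).trans (hrest.cons _)).trans
      (cpt_set_perm _ i _ hiP).symm
  · exact cptB_insort_sorted _ rest (List.pairwise_cons.mp hsort).2

lemma cpt_loop (t : List Int) (hne : t ≠ []) :
    ∀ (l : List Int) (p : List Int) (keys : List (Int × Int)), cptInv t p keys →
      cptInv t (l.foldl (fun p _ => let mi := cptA_scan p t; PySem.List.pySetD p mi.2 mi.1) p)
        (l.foldl (fun ks _ => cptB_step t ks) keys) := by
  intro l
  induction l with
  | nil => intro p keys h; exact h
  | cons x l ih =>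
    intro p keys h
    simp only [List.foldl_cons]
    exact ih _ _ (cpt_step t p keys hne h)

-- rebuilding the load list: every write puts p[j] at position j, so any coverage of 0..n-1 rebuilds p
lemma cpt_write (t p : List Int) :
    ∀ (L : List (Int × Int)) (q : List Int), q.length = t.length →
      (∀ ci ∈ L, ∃ j : Nat, j < t.length ∧
        ci = (PySem.List.pyGetD p (j : Int) 0 + PySem.List.pyGetD t (j : Int) 0, (j : Int))) →
      (L.foldl (fun q ci => PySem.List.pySetD q ci.2 (ci.1 - PySem.List.pyGetD t ci.2 0)) q).length = t.length ∧
      ∀ j : Nat, j < t.length →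
        (L.foldl (fun q ci => PySem.List.pySetD q ci.2 (ci.1 - PySem.List.pyGetD t ci.2 0)) q).getD j 0 =
          if (j : Int) ∈ L.map (·.2) then PySem.List.pyGetD p (j : Int) 0 else q.getD j 0 := by
  intro L
  induction L with
  | nil => intro q hq _; exact ⟨hq, by simp⟩
  | cons ci L ih =>
    intro q hq hmem
    obtain ⟨j0, hj0, hci⟩ := hmem ci (List.mem_cons_self ..)
    have hstep : PySem.List.pySetD q ci.2 (ci.1 - PySem.List.pyGetD t ci.2 0)
        = q.set j0 (PySem.List.pyGetD p (j0 : Int) 0) := by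
      rw [hci]
      simp only [PySem.List.pySetD_natCast]
      congr 1
      ring
    simp only [List.foldl_cons]
    rw [hstep]
    obtain ⟨hlen', hval⟩ := ih (q.set j0 _) (by simp [hq])
      (fun c hc => hmem c (List.mem_cons_of_mem _ hc))
    refine ⟨hlen', ?_⟩
    intro j hj
    rw [hval j hj]
    by_cases hmemL : (j : Int) ∈ L.map (·.2)
    · rw [if_pos hmemL, if_pos (List.mem_map.mp hmemL |>.elim
        (fun c hc => List.mem_map.mpr ⟨c, List.mem_cons_of_mem _ hc.1, hc.2⟩))]
    · rw [if_neg hmemL]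
      by_cases hjj : j = j0
      · subst hjj
        have hm2 : (j : Int) ∈ (ci :: L).map (·.2) := by
          rw [hci]; simp
        rw [if_pos hm2]
        rw [List.getD_eq_getElem _ _ (by rw [List.length_set]; omega)]
        rw [List.getElem_set]
        simp
      · have hm2 : ¬ (j : Int) ∈ (ci :: L).map (·.2) := by
          simp only [List.map_cons, List.mem_cons]
          rw [hci]
          push Not
          exact ⟨by simpa using fun h => hjj (by exact_mod_cast h), hmemL⟩
        rw [if_neg hm2]
        rw [List.getD_eq_getElem _ _ (by rw [List.length_set]; omega),
            List.getD_eq_getElem _ _ (by omega)]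
        rw [List.getElem_set]
        simp [Ne.symm hjj]

lemma cpt_final (t p : List Int) (keys : List (Int × Int)) (h : cptInv t p keys) :
    keys.foldl (fun q ci => PySem.List.pySetD q ci.2 (ci.1 - PySem.List.pyGetD t ci.2 0))
      (List.replicate t.length 0) = p := by
  obtain ⟨hlen, hperm, _⟩ := h
  obtain ⟨hrl, hrv⟩ := cpt_write t p keys (List.replicate t.length 0) (by simp)
    (fun ci hc => mem_cptPairs (hperm.mem_iff.mp hc))
  apply List.ext_getElem (by rw [hrl, hlen])
  intro j h1 h2
  have hj : j < t.length := by rwa [hrl] at h1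
  have hmem : (j : Int) ∈ keys.map (·.2) := by
    rw [(hperm.map (·.2)).mem_iff]
    unfold cptPairs
    rw [List.map_map]
    refine List.mem_map.mpr ⟨(j : Int), ?_, rfl⟩
    rw [PySem.List.mem_pyRange_one]
    simp only [PySem.List.len_eq]
    omega
  have hv := hrv j hj
  rw [if_pos hmem] at hv
  rw [List.getD_eq_getElem _ _ h1] at hv
  rw [hv]
  rw [PySem.List.pyGetD_eq_getElem _ _ (by omega) (by simp; omega)]
  simp

lemma cpt_init (t : List Int) :
    cptInv t (List.replicate t.length 0)
      (((PySem.List.enumerate t 0).map (fun z => (z.2, z.1))).foldr cptB_insort []) := by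
  refine ⟨by simp, ?_, (cpt_foldr_insort _).2⟩
  have hEq : ((PySem.List.enumerate t 0).map (fun z : Int × Int => (z.2, z.1)))
      = cptPairs (List.replicate t.length 0) t := by
    rw [PySem.List.enumerate_eq_map_pyRange (d := 0)]
    unfold cptPairs
    simp only [PySem.List.len_eq, List.map_map]
    apply List.map_congr_left
    intro j hj
    have hj' := PySem.List.mem_pyRange_one.mp hj
    have hz : PySem.List.pyGetD (List.replicate t.length (0 : Int)) j 0 = 0 := by
      rw [PySem.List.pyGetD_eq_getElem _ _ (by omega) (by simp; omega)]
      simp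
    simp [Function.comp, hz]
  exact (cpt_foldr_insort _).1.trans (hEq ▸ List.Perm.refl _)

-- ===== VERDICT (by name: the statement is the Claim_ definition above) =====
theorem calculate_process_time_spec : Claim_equal_calculate_process_time := by
  unfold Claim_equal_calculate_process_time
  intro time number _ hpre
  unfold Spec_calculate_process_time
  match time with
  | none => rfl
  | some t =>
    unfold calculate_process_time calculate_process_time_alt
    by_cases hnum : number ≤ 0
    · simp [hnum]
    · simp only [if_neg hnum]
      have hne : t ≠ [] := by
        rcases hpre with h | h
        · omega
        · intro he; exact h (by rw [he])
      have hinv := cpt_loop t hne (PySem.List.pyRange 0 number 1) _ _ (cpt_init t)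
      rw [cpt_final t _ _ hinv]
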